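-- pv_equiv track=rewrite | github.com/BaoFelix/CodeProbe | tool/report/layer1_workflow.py | _sort_steps_by_call_order
-- ===== SOURCE A (Python) =====
-- def _sort_steps_by_call_order(steps, orchestrator, class_deps):
--     """Sort steps by orchestrator's call order to representative class."""
--     orch_targets = [d['target'] for d in class_deps.get(orchestrator, [])]
--
--     def sort_key(step):
--         rep = step.get('representative', '')
--         if rep in orch_targets:
--             return orch_targets.index(rep)
--         return 999
--     return sorted(steps, key=sort_key)
-- ===== SOURCE B (Python) =====
-- def _sort_steps_by_call_order(steps, orchestrator, class_deps):
--     """Bucket-gather steps by call-order key (counting-sort style) instead of a keyed comparison sort."""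
--     idx = {}
--     for i, d in enumerate(class_deps.get(orchestrator, [])):
--         idx.setdefault(d['target'], i)
--     keyed = [(idx.get(s.get('representative', ''), 999), s) for s in steps]
--     out = []
--     for k in sorted({k for k, _ in keyed}):
--         out.extend(s for kk, s in keyed if kk == k)
--     return out
-- ===== Notes on version B (the rewrite author's own statement) =====
-- stated objective: alternative
-- what changed: A stable-sorts steps with a key function that rescans the orchestrator's target list (membership test plus list.index) per comparison; B builds a first-index dict once, tags each step with its key, and emits the result as a bucket gather over the sorted distinct keys (counting-sort style), with no comparison sort over steps.
import Mathlib
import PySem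

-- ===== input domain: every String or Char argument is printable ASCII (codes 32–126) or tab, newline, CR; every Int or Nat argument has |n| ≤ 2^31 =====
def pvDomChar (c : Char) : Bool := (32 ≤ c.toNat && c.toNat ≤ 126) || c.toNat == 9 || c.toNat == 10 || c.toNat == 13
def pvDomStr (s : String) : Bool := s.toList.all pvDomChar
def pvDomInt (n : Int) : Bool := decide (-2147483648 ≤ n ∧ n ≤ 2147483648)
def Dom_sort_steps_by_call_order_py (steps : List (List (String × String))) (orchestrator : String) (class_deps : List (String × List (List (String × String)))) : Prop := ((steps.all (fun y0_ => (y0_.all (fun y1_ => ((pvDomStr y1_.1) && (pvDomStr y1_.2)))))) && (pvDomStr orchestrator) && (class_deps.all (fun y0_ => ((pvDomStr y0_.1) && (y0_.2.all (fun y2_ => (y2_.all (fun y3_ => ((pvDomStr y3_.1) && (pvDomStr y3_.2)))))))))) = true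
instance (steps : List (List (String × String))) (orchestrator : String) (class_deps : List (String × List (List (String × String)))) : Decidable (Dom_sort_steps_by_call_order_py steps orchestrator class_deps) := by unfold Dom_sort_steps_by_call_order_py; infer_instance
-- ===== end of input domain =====

-- B replaces A's keyed comparison sort by a first-index map plus a bucket gather over the sorted
-- distinct keys (same return value, different algorithm; objective: alternative).

-- ===== PORT A =====
-- d['target'] raises KeyError in Python when the key is missing; exactly those inputs are excluded
-- by Pre_ below, and the port uses .getD "" there (nothing is claimed outside Pre_).
def sort_steps_by_call_order_py (steps : List (List (String × String))) (orchestrator : String) (class_deps : List (String × List (List (String × String)))) : List (List (String × String)) :=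
  let orch_targets : List String :=
    (PySem.Dict.getD (PySem.Dict.mk class_deps) orchestrator []).map
      (fun d => ((PySem.Dict.mk d).get? "target").getD "")
  let sort_key : List (String × String) → Nat := fun step =>
    let rep := PySem.Dict.getD (PySem.Dict.mk step) "representative" ""
    if orch_targets.contains rep then (PySem.List.index? orch_targets rep).getD 999 else 999
  PySem.List.sorted steps sort_key

-- ===== PORT B =====
-- "for i, d in enumerate(class_deps.get(orchestrator, [])): idx.setdefault(d['target'], i)"
-- (same KeyError caveat on d['target'] as in port A)
def pvBuildIdx : List (List (String × String)) → Nat → PySem.Dict String Nat → PySem.Dict String Nat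
  | [], _, d => d
  | dep :: rest, i, d =>
      pvBuildIdx rest (i + 1) (PySem.Dict.setdefault d (((PySem.Dict.mk dep).get? "target").getD "") i)

def sort_steps_by_call_order_py_alt (steps : List (List (String × String))) (orchestrator : String) (class_deps : List (String × List (List (String × String)))) : List (List (String × String)) :=
  let idx := pvBuildIdx (PySem.Dict.getD (PySem.Dict.mk class_deps) orchestrator []) 0 PySem.Dict.empty
  let keyed := steps.map (fun s => (PySem.Dict.getD idx (PySem.Dict.getD (PySem.Dict.mk s) "representative" "") 999, s))
  let ks := PySem.List.sorted (PySem.Set.ofList (keyed.map (fun p => p.1))) (fun k => k)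
  ks.foldl (fun out k => out ++ (keyed.filter (fun p => p.1 == k)).map (fun p => p.2)) []

-- ===== PRECONDITION & SPEC =====
-- Pre_ excludes exactly the inputs where some dict in the orchestrator's dependency list has no
-- 'target' key: there Python's d['target'] raises KeyError, so A returns no value.
def Pre_sort_steps_by_call_order_py (steps : List (List (String × String))) (orchestrator : String) (class_deps : List (String × List (List (String × String)))) : Prop :=
  ((PySem.Dict.getD (PySem.Dict.mk class_deps) orchestrator []).all
    (fun d => (PySem.Dict.mk d).contains "target")) = true
instance (steps : List (List (String × String))) (orchestrator : String) (class_deps : List (String × List (List (String × String)))) : Decidable (Pre_sort_steps_by_call_order_py steps orchestrator class_deps) := by unfold Pre_sort_steps_by_call_order_py; infer_instance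

def pvWitness_sort_steps_by_call_order_py : (List (List (String × String))) × String × (List (String × List (List (String × String)))) :=
  ([[("representative", "X")], [("representative", "Y")]], "o", [("o", [[("target", "Y")], [("target", "X")]])])

def Spec_sort_steps_by_call_order_py (steps : List (List (String × String))) (orchestrator : String) (class_deps : List (String × List (List (String × String)))) (out : List (List (String × String))) : Prop := out = sort_steps_by_call_order_py_alt steps orchestrator class_deps
instance (steps : List (List (String × String))) (orchestrator : String) (class_deps : List (String × List (List (String × String)))) (out : List (List (String × String))) : Decidable (Spec_sort_steps_by_call_order_py steps orchestrator class_deps out) := by unfold Spec_sort_steps_by_call_order_py; infer_instance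

-- ===== CLAIM (what is proved, stated in full; the proofs are below) =====
def Claim_equal_sort_steps_by_call_order_py : Prop := ∀ (steps : List (List (String × String))) (orchestrator : String) (class_deps : List (String × List (List (String × String)))), Dom_sort_steps_by_call_order_py steps orchestrator class_deps → Pre_sort_steps_by_call_order_py steps orchestrator class_deps → Spec_sort_steps_by_call_order_py steps orchestrator class_deps (sort_steps_by_call_order_py steps orchestrator class_deps)

-- ===== LEMMAS AND PROOFS =====

theorem pv_insertBy_append {α : Type} (before : α → α → Bool) (x : α) (l m : List α)
    (h : ∀ y ∈ l, before x y = false) :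
    PySem.List.insertBy before x (l ++ m) = l ++ PySem.List.insertBy before x m := by
  induction l with
  | nil => rfl
  | cons a l ih =>
    simp only [List.cons_append, PySem.List.insertBy, h a (by simp)]
    simpa using ih (fun y hy => h y (by simp [hy]))

theorem pv_insertBy_front {α : Type} (before : α → α → Bool) (x : α) (m : List α)
    (h : ∀ y ∈ m, before x y = true) :
    PySem.List.insertBy before x m = x :: m := by
  cases m with
  | nil => rfl
  | cons a l => simp [PySem.List.insertBy, h a (by simp)]

theorem pv_flatMap_congr {α β : Type} {l : List α} {f g : α → List β}
    (h : ∀ x ∈ l, f x = g x) : l.flatMap f = l.flatMap g := by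
  induction l with
  | nil => rfl
  | cons a l ih => simp [List.flatMap_cons, h a (by simp), ih (fun x hx => h x (by simp [hx]))]

theorem pv_ins_mem {α : Type} (key : α → Nat) (x : α) (v : Nat) (hv : key x = v)
    (ks : List Nat) (B : Nat → List α)
    (hks : ks.Pairwise (· < ·)) (hmem : v ∈ ks)
    (hB : ∀ k ∈ ks, ∀ y ∈ B k, key y = k) :
    PySem.List.insertBy (fun a b => decide (key a < key b)) x (ks.flatMap B)
      = ks.flatMap (fun k => B k ++ if v == k then [x] else []) := by
  induction ks with
  | nil => cases hmem
  | cons k0 rest ih =>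
    rcases List.pairwise_cons.mp hks with ⟨hk0, hrest⟩
    rw [List.flatMap_cons, List.flatMap_cons]
    by_cases hvk : v = k0
    · have h1 : ∀ y ∈ B k0, (fun a b => decide (key a < key b)) x y = false := by
        intro y hy
        have hy' := hB k0 (by simp) y hy
        simp [hy', hv, hvk]
      rw [pv_insertBy_append _ _ _ _ h1]
      have h2 : ∀ y ∈ rest.flatMap B, (fun a b => decide (key a < key b)) x y = true := by
        intro y hy
        rcases List.mem_flatMap.mp hy with ⟨k, hk, hyk⟩
        have hky := hB k (by simp [hk]) y hyk
        have hlt := hk0 k hk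
        simp [hky, hv, hvk]
        omega
      rw [pv_insertBy_front _ _ _ h2]
      have h3 : rest.flatMap (fun k => B k ++ if v == k then [x] else []) = rest.flatMap B := by
        apply pv_flatMap_congr
        intro k hk
        have hne : (v == k) = false := by have := hk0 k hk; simp; omega
        simp [hne]
      rw [h3]
      simp [hvk]
    · have hvmem : v ∈ rest := by
        rcases List.mem_cons.mp hmem with h | h
        · exact absurd h hvk
        · exact h
      have h1 : ∀ y ∈ B k0, (fun a b => decide (key a < key b)) x y = false := by
        intro y hy
        have hy' := hB k0 (by simp) y hy
        have := hk0 v hvmem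
        simp [hy', hv]
        omega
      rw [pv_insertBy_append _ _ _ _ h1]
      rw [ih hrest hvmem (fun k hk y hy => hB k (by simp [hk]) y hy)]
      have hne : (v == k0) = false := by simp [hvk]
      simp [hne]

theorem pv_ins_not_mem {α : Type} (key : α → Nat) (x : α) (v : Nat) (hv : key x = v)
    (ks : List Nat) (B : Nat → List α)
    (hks : ks.Pairwise (· < ·)) (hmem : v ∉ ks)
    (hB : ∀ k ∈ ks, ∀ y ∈ B k, key y = k) :
    PySem.List.insertBy (fun a b => decide (key a < key b)) x (ks.flatMap B)
      = (PySem.List.insertBy (fun a b => decide (a < b)) v ks).flatMap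
          (fun k => if k == v then [x] else B k) := by
  induction ks with
  | nil => simp [PySem.List.insertBy]
  | cons k0 rest ih =>
    rcases List.pairwise_cons.mp hks with ⟨hk0, hrest⟩
    have hvk : v ≠ k0 := fun h => hmem (h ▸ List.mem_cons_self ..)
    by_cases hlt : v < k0
    · have h2 : ∀ y ∈ (k0 :: rest).flatMap B, (fun a b => decide (key a < key b)) x y = true := by
        intro y hy
        rcases List.mem_flatMap.mp hy with ⟨k, hk, hyk⟩
        have hky := hB k hk y hyk
        have hk0k : k0 ≤ k := by
          rcases List.mem_cons.mp hk with h | h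
          · omega
          · have := hk0 k h; omega
        simp [hky, hv]
        omega
      rw [pv_insertBy_front _ _ _ h2]
      have hins : PySem.List.insertBy (fun a b => decide (a < b)) v (k0 :: rest) = v :: k0 :: rest := by
        simp [PySem.List.insertBy, hlt]
      have hcg : rest.flatMap (fun k => if k == v then [x] else B k) = rest.flatMap B := by
        apply pv_flatMap_congr
        intro k hk
        have : (k == v) = false := by have := hk0 k hk; simp; omega
        simp [this]
      have hk0ne : (k0 == v) = false := by simp; omega
      rw [hins]
      simp only [List.flatMap_cons, beq_self_eq_true, if_true, hk0ne, Bool.false_eq_true, if_false, hcg]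
      simp
    · have hk0v : k0 < v := by omega
      have h1 : ∀ y ∈ B k0, (fun a b => decide (key a < key b)) x y = false := by
        intro y hy
        have hy' := hB k0 (by simp) y hy
        simp [hy', hv]
        omega
      rw [List.flatMap_cons, pv_insertBy_append _ _ _ _ h1]
      have hins : PySem.List.insertBy (fun a b => decide (a < b)) v (k0 :: rest) = k0 :: PySem.List.insertBy (fun a b => decide (a < b)) v rest := by
        have : ¬ (v < k0) := by omega
        simp [PySem.List.insertBy, this]
      rw [hins, List.flatMap_cons]
      have hne : (k0 == v) = false := by simp; omega
      rw [ih hrest (fun h => hmem (by simp [h])) (fun k hk y hy => hB k (by simp [hk]) y hy)]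
      simp [hne]

theorem pv_sorted_append_singleton {α : Type} (l : List α) (y : α) (k : α → Nat) :
    PySem.List.sorted (l ++ [y]) k
      = PySem.List.insertBy (fun a b => decide (k a < k b)) y (PySem.List.sorted l k) := by
  rw [PySem.List.sorted_eq_foldl_insertBy, PySem.List.sorted_eq_foldl_insertBy, List.foldl_append]
  rfl

theorem pv_ofList_append {α : Type} [BEq α] (l : List α) (a : α) :
    PySem.Set.ofList (l ++ [a]) = PySem.Set.add (PySem.Set.ofList l) a := by
  simp [PySem.Set.ofList, List.foldl_append]

theorem pv_sorted_eq_buckets {α : Type} (key : α → Nat) (xs : List α) :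
    PySem.List.sorted xs key
      = (PySem.List.sorted (PySem.Set.ofList (xs.map key)) (fun k => k)).flatMap
          (fun v => xs.filter (fun x => key x == v)) := by
  induction xs using List.reverseRecOn with
  | nil => rfl
  | append_singleton xs x ih =>
    have hperm : ∀ y, y ∈ PySem.List.sorted (PySem.Set.ofList (xs.map key)) (fun k => k) ↔ y ∈ xs.map key := by
      intro y
      rw [PySem.List.mem_sorted, PySem.Set.mem_ofList]
    have hks := PySem.List.sorted_ofList_pairwise_lt (xs.map key)
    have hB : ∀ k ∈ PySem.List.sorted (PySem.Set.ofList (xs.map key)) (fun k => k),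
        ∀ y ∈ xs.filter (fun z => key z == k), key y = k := by
      intro k _ y hy
      have := (List.mem_filter.mp hy).2
      simpa using this
    rw [pv_sorted_append_singleton, ih, List.map_append]
    simp only [List.map_cons, List.map_nil]
    rw [pv_ofList_append]
    by_cases hv : key x ∈ xs.map key
    · have hadd : PySem.Set.add (PySem.Set.ofList (xs.map key)) (key x) = PySem.Set.ofList (xs.map key) := by
        have hct : PySem.Set.contains (PySem.Set.ofList (xs.map key)) (key x) = true := by
          simp [PySem.Set.contains, PySem.Set.mem_ofList]
          exact List.mem_map.mp hv
        simp only [PySem.Set.add]; rw [hct]; simp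
      rw [hadd]
      rw [pv_ins_mem key x (key x) rfl _ _ hks ((hperm _).mpr hv) hB]
      apply pv_flatMap_congr
      intro k hk
      by_cases hxk : key x = k <;> simp [List.filter_append, hxk]
    · have hadd : PySem.Set.add (PySem.Set.ofList (xs.map key)) (key x) = PySem.Set.ofList (xs.map key) ++ [key x] := by
        have hct : PySem.Set.contains (PySem.Set.ofList (xs.map key)) (key x) = false := by
          simp [PySem.Set.contains, PySem.Set.mem_ofList]
          intro y hy h
          exact hv (h ▸ List.mem_map_of_mem hy)
        simp only [PySem.Set.add]; rw [hct]; simp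
      rw [hadd]
      have hnm : key x ∉ PySem.List.sorted (PySem.Set.ofList (xs.map key)) (fun k => k) := by
        rw [hperm]; exact hv
      rw [pv_ins_not_mem key x (key x) rfl _ _ hks hnm hB]
      have hsing : PySem.List.sorted (PySem.Set.ofList (xs.map key) ++ [key x]) (fun k => k)
          = PySem.List.insertBy (fun a b => decide (a < b)) (key x) (PySem.List.sorted (PySem.Set.ofList (xs.map key)) (fun k => k)) := by
        simpa using pv_sorted_append_singleton (PySem.Set.ofList (xs.map key)) (key x) (fun k => k)
      rw [hsing]
      apply pv_flatMap_congr
      intro k hk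
      rcases (PySem.List.mem_insertBy _ _ _ _).mp hk with h | h
      · subst h
        have hnil : xs.filter (fun z => key z == key x) = [] := by
          rw [List.filter_eq_nil_iff]
          intro y hy hky
          simp only [beq_iff_eq] at hky
          exact hv (hky ▸ List.mem_map_of_mem hy)
        simp [List.filter_append, hnil]
      · have hne : k ≠ key x := fun heq => (heq ▸ hnm) h
        have h1 : (k == key x) = false := beq_eq_false_iff_ne.mpr hne
        have h2 : (key x == k) = false := beq_eq_false_iff_ne.mpr (Ne.symm hne)
        simp [List.filter_append, h1, h2]


theorem pv_buildIdx_getD (deps : List (List (String × String))) (r : String) :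
    ∀ (i : Nat) (d : PySem.Dict String Nat),
    PySem.Dict.getD (pvBuildIdx deps i d) r 999
      = if d.contains r then d.getD r 999
        else match PySem.List.index? (deps.map (fun dp => ((PySem.Dict.mk dp).get? "target").getD "")) r with
             | some j => i + j
             | none => 999 := by
  induction deps with
  | nil =>
    intro i d
    by_cases h : d.contains r = true
    · simp [pvBuildIdx, h]
    · simp only [Bool.not_eq_true] at h
      simp [pvBuildIdx, h, PySem.List.index?, PySem.Dict.getD_of_not_contains d _ h]
  | cons dep rest ih =>
    intro i d
    have hstep : pvBuildIdx (dep :: rest) i d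
        = pvBuildIdx rest (i + 1) (PySem.Dict.setdefault d (((PySem.Dict.mk dep).get? "target").getD "") i) := rfl
    rw [hstep, ih]
    set t := ((PySem.Dict.mk dep).get? "target").getD "" with ht
    by_cases hdr : d.contains r = true
    · have hc : (PySem.Dict.setdefault d t i).contains r = true := by
        rw [PySem.Dict.contains_setdefault]; simp [hdr]
      rw [if_pos hc, if_pos hdr]
      by_cases htr : r = t
      · subst htr
        rw [PySem.Dict.getD_setdefault_self]
        cases hq : d.get? t with
        | none =>
          rw [PySem.Dict.get?_eq_none_iff_contains] at hq
          rw [hq] at hdr; cases hdr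
        | some v => simp [PySem.Dict.getD, hq]
      · simp [PySem.Dict.getD, PySem.Dict.get?_setdefault_of_ne d i htr]
    · simp only [Bool.not_eq_true] at hdr
      by_cases htr : t = r
      · subst htr
        have hc : (PySem.Dict.setdefault d t i).contains t = true := by
          rw [PySem.Dict.contains_setdefault]; simp
        rw [if_pos hc, if_neg (by simp [hdr])]
        rw [PySem.Dict.getD_setdefault_self, PySem.Dict.getD_of_not_contains d i hdr]
        simp [PySem.List.index?, List.idxOf?_cons, ← ht]
      · have hc : (PySem.Dict.setdefault d t i).contains r = false := by
          rw [PySem.Dict.contains_setdefault, hdr]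
          simp [beq_eq_false_iff_ne.mpr (fun h => htr h.symm)]
        rw [if_neg (by simp [hc]), if_neg (by simp [hdr])]
        simp only [List.map_cons, PySem.List.index?, List.idxOf?_cons]
        have : (t == r) = false := beq_eq_false_iff_ne.mpr htr
        rw [this]
        simp only [Bool.false_eq_true, if_false]
        cases hidx : List.idxOf? r (rest.map (fun dp => ((PySem.Dict.mk dp).get? "target").getD "")) with
        | none => simp
        | some j => simp; omega

theorem pv_ports_agree (steps : List (List (String × String))) (orchestrator : String) (class_deps : List (String × List (List (String × String)))) :
    sort_steps_by_call_order_py steps orchestrator class_deps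
      = sort_steps_by_call_order_py_alt steps orchestrator class_deps := by
  unfold sort_steps_by_call_order_py sort_steps_by_call_order_py_alt
  set deps := PySem.Dict.getD (PySem.Dict.mk class_deps) orchestrator [] with hdeps
  set targets := deps.map (fun d => ((PySem.Dict.mk d).get? "target").getD "") with htargets
  have hkey : ∀ r : String,
      PySem.Dict.getD (pvBuildIdx deps 0 PySem.Dict.empty) r 999
        = if targets.contains r then (PySem.List.index? targets r).getD 999 else 999 := by
    intro r
    rw [pv_buildIdx_getD]
    rw [if_neg (by simp [PySem.Dict.contains_empty])]
    cases hidx : PySem.List.index? targets r with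
    | some j =>
      have hct : targets.contains r = true := by
        have h2 : (List.idxOf? r targets).isSome := by
          simp [PySem.List.index?] at hidx; simp [hidx]
        simp [List.isSome_idxOf?] at h2
        simpa using h2
      simp
      intro hmem
      exact absurd (by simpa using hct) hmem
    | none =>
      have hct : targets.contains r = false := by
        have h2 : ¬ (List.idxOf? r targets).isSome := by
          simp [PySem.List.index?] at hidx; simp [hidx]
        simp [List.isSome_idxOf?] at h2
        simpa using h2
      simp
  show PySem.List.sorted steps
      (fun step =>
        if targets.contains (PySem.Dict.getD (PySem.Dict.mk step) "representative" "") then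
          (PySem.List.index? targets (PySem.Dict.getD (PySem.Dict.mk step) "representative" "")).getD 999
        else 999)
    = List.foldl (fun out k => out ++ (List.filter (fun p => p.1 == k)
          (steps.map (fun s => (PySem.Dict.getD (pvBuildIdx deps 0 PySem.Dict.empty) (PySem.Dict.getD (PySem.Dict.mk s) "representative" "") 999, s)))).map (fun p => p.2)) []
        (PySem.List.sorted (PySem.Set.ofList ((steps.map (fun s => (PySem.Dict.getD (pvBuildIdx deps 0 PySem.Dict.empty) (PySem.Dict.getD (PySem.Dict.mk s) "representative" "") 999, s))).map (fun p => p.1))) (fun k => k))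
  have hfun : (fun s : List (String × String) =>
        (PySem.Dict.getD (pvBuildIdx deps 0 PySem.Dict.empty) (PySem.Dict.getD (PySem.Dict.mk s) "representative" "") 999, s))
      = (fun s : List (String × String) =>
        ((if targets.contains (PySem.Dict.getD (PySem.Dict.mk s) "representative" "") then
            (PySem.List.index? targets (PySem.Dict.getD (PySem.Dict.mk s) "representative" "")).getD 999
          else 999), s)) := funext (fun s => by rw [hkey])
  rw [hfun, PySem.List.foldl_append_eq_flatMap]
  simp only [List.nil_append, List.map_map, List.filter_map, Function.comp_def, List.map_id']
  exact pv_sorted_eq_buckets _ steps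

-- ===== VERDICT (by name: the statement is the Claim_ definition above) =====
theorem sort_steps_by_call_order_py_spec : Claim_equal_sort_steps_by_call_order_py := by
  intro steps orchestrator class_deps _hdom _hpre
  unfold Spec_sort_steps_by_call_order_py
  exact pv_ports_agree steps orchestrator class_deps
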